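-- pv_equiv track=rewrite | github.com/Numbatt/storm | backend/api/src/recommend/recommender.py | _generate_community_summary
-- ===== SOURCE A (Python) =====
-- from typing import Dict, List, Tuple
--
-- def _generate_community_summary(interventions: List[Dict], total_flood_reduction: int, road_type: str) -> str:
--     """Generate community impact summary with scaled severity for multiple interventions."""
--     if not interventions:
--         return "No interventions needed."
--
--     # Count interventions by severity level
--     severities = [intervention['impact_severity'] for intervention in interventions]
--     severity_counts = {
--         'LOW': severities.count('LOW'),
--         'MEDIUM': severities.count('MEDIUM'),
--         'HIGH': severities.count('HIGH')
--     }
--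
--     # Determine overall impact severity with scaling logic
--     if severity_counts['HIGH'] > 0:
--         overall_severity = 'HIGH'  # Any HIGH caps at HIGH
--     elif severity_counts['MEDIUM'] > 0:
--         overall_severity = 'MEDIUM'
--     elif severity_counts['LOW'] >= 2:
--         # Multiple LOW interventions in same area scale to MEDIUM
--         overall_severity = 'MEDIUM'
--     else:
--         overall_severity = 'LOW'
--
--     # Create summary based on road type and severity
--     if road_type == 'interstate section':
--         if overall_severity == 'HIGH':
--             impact_desc = "Major regional disruption with significant commuter delays"
--         elif overall_severity == 'MEDIUM':
--             impact_desc = "Moderate traffic disruption during construction"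
--         else:
--             impact_desc = "Minor traffic impact during construction"
--     elif road_type == 'highway lane':
--         if overall_severity == 'HIGH':
--             impact_desc = "Significant traffic delays and congestion"
--         elif overall_severity == 'MEDIUM':
--             impact_desc = "Some congestion during peak hours"
--         else:
--             impact_desc = "Minimal traffic impact"
--     else:  # residential, sidewalk, parking lot
--         if overall_severity == 'HIGH':
--             impact_desc = "Extended local disruption"
--         elif overall_severity == 'MEDIUM':
--             impact_desc = "Moderate temporary disruption"
--         else:
--             impact_desc = "Minor temporary delays"
--
--     return f"{impact_desc}, but runoff decreases ~{total_flood_reduction}% post-construction."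
-- ===== SOURCE B (Python) =====
-- # Sort-then-inspect: sort severity ranks descending, read top one/two elements;
-- # pick the summary by arithmetic index into a flat 9-entry table.
-- _RANK = {'LOW': 1, 'MEDIUM': 2, 'HIGH': 3}
--
-- _SUMMARIES = (
--     # residential / other (bucket 0): LOW, MEDIUM, HIGH
--     "Minor temporary delays",
--     "Moderate temporary disruption",
--     "Extended local disruption",
--     # highway lane (bucket 1)
--     "Minimal traffic impact",
--     "Some congestion during peak hours",
--     "Significant traffic delays and congestion",
--     # interstate section (bucket 2)
--     "Minor traffic impact during construction",
--     "Moderate traffic disruption during construction",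
--     "Major regional disruption with significant commuter delays",
-- )
--
-- def _generate_community_summary(interventions, total_flood_reduction, road_type):
--     if not interventions:
--         return "No interventions needed."
--
--     # Descending ranks: ranks[0] is the strongest severity, ranks[1] the runner-up.
--     ranks = sorted((_RANK.get(i['impact_severity'], 0) for i in interventions),
--                    reverse=True)
--     top = ranks[0]
--     if top >= 2:
--         overall = top - 1          # MEDIUM -> 1, HIGH -> 2
--     elif top == 1 and len(ranks) > 1 and ranks[1] == 1:
--         overall = 1                # two or more LOWs scale to MEDIUM
--     else:
--         overall = 0                # LOW (or only unrecognised severities)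
--
--     bucket = 2 if road_type == 'interstate section' else 1 if road_type == 'highway lane' else 0
--     impact_desc = _SUMMARIES[3 * bucket + overall]
--     return f"{impact_desc}, but runoff decreases ~{total_flood_reduction}% post-construction."
-- ===== Notes on version B (the rewrite author's own statement) =====
-- stated objective: alternative
-- what changed: Instead of counting each severity and walking a nine-way nested if/elif tree, B sorts the mapped severity ranks descending and reads only the top one or two elements to fix the overall severity, then selects the summary by arithmetic index (3*road_bucket + severity) into a flat 9-entry tuple.
import Mathlib
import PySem

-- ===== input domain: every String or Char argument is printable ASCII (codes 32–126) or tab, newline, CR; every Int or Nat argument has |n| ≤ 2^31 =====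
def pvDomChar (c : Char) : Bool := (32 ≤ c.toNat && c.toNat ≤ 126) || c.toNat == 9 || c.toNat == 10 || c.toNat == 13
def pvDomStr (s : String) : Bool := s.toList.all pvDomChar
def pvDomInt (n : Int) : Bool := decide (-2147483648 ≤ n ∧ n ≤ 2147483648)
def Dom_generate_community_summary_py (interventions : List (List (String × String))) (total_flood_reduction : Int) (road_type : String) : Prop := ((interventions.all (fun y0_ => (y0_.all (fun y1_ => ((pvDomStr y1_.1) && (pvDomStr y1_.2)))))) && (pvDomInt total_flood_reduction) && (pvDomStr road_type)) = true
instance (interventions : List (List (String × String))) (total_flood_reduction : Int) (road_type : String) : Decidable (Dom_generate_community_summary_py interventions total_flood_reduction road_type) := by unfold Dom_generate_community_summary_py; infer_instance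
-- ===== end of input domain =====

-- B replaces A's three count() scans and nine-way if/elif tree with a descending sort of
-- severity ranks (inspect the top one or two) and an arithmetically indexed flat 9-entry table.


-- ===== PORT A =====
def generate_community_summary_py (interventions : List (List (String × String))) (total_flood_reduction : Int) (road_type : String) : String :=
  if interventions = [] then "No interventions needed."
  else
    -- severities = [intervention['impact_severity'] ...]; KeyError (lookup = none) excluded by Pre_
    let severities := interventions.map (fun d => (List.lookup "impact_severity" d).getD "")
    let cLow := PySem.List.count severities "LOW"
    let cMed := PySem.List.count severities "MEDIUM"
    let cHigh := PySem.List.count severities "HIGH"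
    let overall_severity :=
      if cHigh > 0 then "HIGH"
      else if cMed > 0 then "MEDIUM"
      else if cLow ≥ 2 then "MEDIUM"
      else "LOW"
    let impact_desc :=
      if road_type = "interstate section" then
        if overall_severity = "HIGH" then "Major regional disruption with significant commuter delays"
        else if overall_severity = "MEDIUM" then "Moderate traffic disruption during construction"
        else "Minor traffic impact during construction"
      else if road_type = "highway lane" then
        if overall_severity = "HIGH" then "Significant traffic delays and congestion"
        else if overall_severity = "MEDIUM" then "Some congestion during peak hours"
        else "Minimal traffic impact"
      else
        if overall_severity = "HIGH" then "Extended local disruption"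
        else if overall_severity = "MEDIUM" then "Moderate temporary disruption"
        else "Minor temporary delays"
    impact_desc ++ ", but runoff decreases ~" ++ PySem.Int.toStr total_flood_reduction ++ "% post-construction."

-- ===== PORT B =====
-- _RANK.get(s, 0)
def pvRankOf (s : String) : Int :=
  PySem.Dict.getD (PySem.Dict.mk [("LOW", 1), ("MEDIUM", 2), ("HIGH", 3)]) s 0

-- the flat 9-entry _SUMMARIES tuple, index = 3*bucket + overall
def pvSummaries : List String :=
  ["Minor temporary delays",
   "Moderate temporary disruption",
   "Extended local disruption",
   "Minimal traffic impact",
   "Some congestion during peak hours",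
   "Significant traffic delays and congestion",
   "Minor traffic impact during construction",
   "Moderate traffic disruption during construction",
   "Major regional disruption with significant commuter delays"]

def generate_community_summary_py_alt (interventions : List (List (String × String))) (total_flood_reduction : Int) (road_type : String) : String :=
  if interventions = [] then "No interventions needed."
  else
    let ranks := PySem.List.sorted
      (interventions.map (fun d => pvRankOf ((List.lookup "impact_severity" d).getD "")))
      (fun x => x) true
    -- ranks[0]: the guard makes ranks nonempty, so the getD default is never used
    let top := (PySem.List.pyGet? ranks 0).getD 0
    let overall : Int :=
      if top ≥ 2 then top - 1
      else if top = 1 ∧ ranks.length > 1 ∧ (PySem.List.pyGet? ranks 1).getD 0 = 1 then 1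
      else 0
    let bucket : Int :=
      if road_type = "interstate section" then 2
      else if road_type = "highway lane" then 1
      else 0
    -- _SUMMARIES[3*bucket + overall]: index is always in [0,8], getD default never used
    (PySem.List.pyGet? pvSummaries (3 * bucket + overall)).getD ""
      ++ ", but runoff decreases ~" ++ PySem.Int.toStr total_flood_reduction ++ "% post-construction."

-- ===== PRECONDITION & SPEC =====
-- Pre_ excludes exactly the inputs where A raises KeyError: an intervention dict without the
-- 'impact_severity' key (B raises KeyError there as well).
def Pre_generate_community_summary_py (interventions : List (List (String × String))) (total_flood_reduction : Int) (road_type : String) : Prop :=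
  ∀ d ∈ interventions, (List.lookup "impact_severity" d).isSome
instance (interventions : List (List (String × String))) (total_flood_reduction : Int) (road_type : String) : Decidable (Pre_generate_community_summary_py interventions total_flood_reduction road_type) := by unfold Pre_generate_community_summary_py; infer_instance

def pvWitness_generate_community_summary_py : (List (List (String × String))) × Int × String :=
  ([[("impact_severity", "LOW")], [("impact_severity", "LOW")]], 30, "highway lane")

def Spec_generate_community_summary_py (interventions : List (List (String × String))) (total_flood_reduction : Int) (road_type : String) (out : String) : Prop := out = generate_community_summary_py_alt interventions total_flood_reduction road_type
instance (interventions : List (List (String × String))) (total_flood_reduction : Int) (road_type : String) (out : String) : Decidable (Spec_generate_community_summary_py interventions total_flood_reduction road_type out) := by unfold Spec_generate_community_summary_py; infer_instance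

-- ===== CLAIM (what is proved, stated in full; the proofs are below) =====
def Claim_equal_generate_community_summary_py : Prop := ∀ (interventions : List (List (String × String))) (total_flood_reduction : Int) (road_type : String), Dom_generate_community_summary_py interventions total_flood_reduction road_type → Pre_generate_community_summary_py interventions total_flood_reduction road_type → Spec_generate_community_summary_py interventions total_flood_reduction road_type (generate_community_summary_py interventions total_flood_reduction road_type)

-- ===== LEMMAS AND PROOFS =====

lemma pvRankOf_other (s : String) (h1 : s ≠ "LOW") (h2 : s ≠ "MEDIUM") (h3 : s ≠ "HIGH") :
    pvRankOf s = 0 := by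
  unfold pvRankOf
  have hf : List.find? (fun p => p.1 == s) [("LOW", (1 : Int)), ("MEDIUM", 2), ("HIGH", 3)] = none := by
    rw [List.find?_eq_none]
    intro x hx
    simp only [List.mem_cons, List.not_mem_nil, or_false] at hx
    rcases hx with rfl | rfl | rfl <;> simp <;> intro h <;>
      first | exact h1 h.symm | exact h2 h.symm | exact h3 h.symm
  simp [PySem.Dict.getD, PySem.Dict.get?, hf]

lemma pvRankOf_mem (s : String) : pvRankOf s = 0 ∨ pvRankOf s = 1 ∨ pvRankOf s = 2 ∨ pvRankOf s = 3 := by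
  by_cases h1 : s = "LOW"; · subst h1; decide
  by_cases h2 : s = "MEDIUM"; · subst h2; decide
  by_cases h3 : s = "HIGH"; · subst h3; decide
  rw [pvRankOf_other s h1 h2 h3]; left; rfl

lemma pvRankOf_eq_three (s : String) : pvRankOf s = 3 ↔ s = "HIGH" := by
  by_cases h1 : s = "LOW"; · subst h1; decide
  by_cases h2 : s = "MEDIUM"; · subst h2; decide
  by_cases h3 : s = "HIGH"; · subst h3; decide
  rw [pvRankOf_other s h1 h2 h3]; simp [h3]

lemma pvRankOf_eq_two (s : String) : pvRankOf s = 2 ↔ s = "MEDIUM" := by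
  by_cases h1 : s = "LOW"; · subst h1; decide
  by_cases h2 : s = "MEDIUM"; · subst h2; decide
  by_cases h3 : s = "HIGH"; · subst h3; decide
  rw [pvRankOf_other s h1 h2 h3]; simp [h2]

lemma pvRankOf_eq_one (s : String) : pvRankOf s = 1 ↔ s = "LOW" := by
  by_cases h1 : s = "LOW"; · subst h1; decide
  by_cases h2 : s = "MEDIUM"; · subst h2; decide
  by_cases h3 : s = "HIGH"; · subst h3; decide
  rw [pvRankOf_other s h1 h2 h3]; simp [h1]

-- counting a value with a unique preimage through a map
lemma count_map_unique {α : Type} [DecidableEq α] (f : α → Int) (v : Int) (s : α)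
    (h : ∀ a, f a = v ↔ a = s) (xs : List α) :
    (xs.map f).count v = xs.count s := by
  induction xs with
  | nil => rfl
  | cons a t ih =>
    by_cases ha : a = s
    · subst ha
      simp [ih, (h a).mpr rfl]
    · have : f a ≠ v := fun hv => ha ((h a).mp hv)
      simp [ih, this, ha]

-- facts about the descending sort of a rank list
lemma pv_top_mem {R : List Int} {h : Int} {t : List Int}
    (hlht : PySem.List.sorted R (fun x => x) true = h :: t) : h ∈ R := by
  have hp := PySem.List.sorted_perm R (fun x => x) true
  rw [hlht] at hp
  exact hp.mem_iff.mp (List.mem_cons_self)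

lemma pv_top_ge {R : List Int} {h : Int} {t : List Int} {v : Int}
    (hlht : PySem.List.sorted R (fun x => x) true = h :: t) (hv : v ∈ R) : v ≤ h := by
  simpa using PySem.List.key_head_sorted_rev_ge R (fun x => x) hlht v hv

lemma pv_count_sorted (R : List Int) (v : Int) :
    (PySem.List.sorted R (fun x => x) true).count v = R.count v :=
  (PySem.List.sorted_perm R (fun x => x) true).count_eq v

lemma pv_top_three {R : List Int} {h : Int} {t : List Int}
    (hlht : PySem.List.sorted R (fun x => x) true = h :: t)
    (hmem : ∀ r ∈ R, r = 0 ∨ r = 1 ∨ r = 2 ∨ r = 3)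
    (h3 : 0 < R.count 3) : h = 3 := by
  have h3m : (3 : Int) ∈ R := List.count_pos_iff.mp h3
  have h1 := pv_top_ge hlht h3m
  rcases hmem h (pv_top_mem hlht) with rfl | rfl | rfl | rfl <;> omega

lemma pv_top_two {R : List Int} {h : Int} {t : List Int}
    (hlht : PySem.List.sorted R (fun x => x) true = h :: t)
    (hmem : ∀ r ∈ R, r = 0 ∨ r = 1 ∨ r = 2 ∨ r = 3)
    (h3 : R.count 3 = 0) (h2 : 0 < R.count 2) : h = 2 := by
  have h2m : (2 : Int) ∈ R := List.count_pos_iff.mp h2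
  have hge := pv_top_ge hlht h2m
  have hne3 : h ≠ 3 := fun hh => by
    have : (3 : Int) ∈ R := hh ▸ pv_top_mem hlht
    exact absurd (List.count_pos_iff.mpr this) (by omega)
  rcases hmem h (pv_top_mem hlht) with rfl | rfl | rfl | rfl <;> omega

lemma pv_top_one {R : List Int} {h : Int} {t : List Int}
    (hlht : PySem.List.sorted R (fun x => x) true = h :: t)
    (hmem : ∀ r ∈ R, r = 0 ∨ r = 1 ∨ r = 2 ∨ r = 3)
    (h3 : R.count 3 = 0) (h2 : R.count 2 = 0) (h1 : 0 < R.count 1) : h = 1 := by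
  have h1m : (1 : Int) ∈ R := List.count_pos_iff.mp h1
  have hge := pv_top_ge hlht h1m
  have hne3 : h ≠ 3 := fun hh => by
    have : (3 : Int) ∈ R := hh ▸ pv_top_mem hlht
    exact absurd (List.count_pos_iff.mpr this) (by omega)
  have hne2 : h ≠ 2 := fun hh => by
    have : (2 : Int) ∈ R := hh ▸ pv_top_mem hlht
    exact absurd (List.count_pos_iff.mpr this) (by omega)
  rcases hmem h (pv_top_mem hlht) with rfl | rfl | rfl | rfl <;> omega

-- second element of the descending sort when there are at least two LOWs and nothing higher
lemma pv_second_one {R : List Int} {h : Int} {t : List Int}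
    (hlht : PySem.List.sorted R (fun x => x) true = h :: t)
    (hmem : ∀ r ∈ R, r = 0 ∨ r = 1 ∨ r = 2 ∨ r = 3)
    (h3 : R.count 3 = 0) (h2 : R.count 2 = 0) (h1 : 2 ≤ R.count 1) :
    ∃ h2e t2, t = h2e :: t2 ∧ h2e = 1 := by
  have htop : h = 1 := pv_top_one hlht hmem h3 h2 (by omega)
  subst htop
  have hcl : (PySem.List.sorted R (fun x => x) true).count 1 = R.count 1 := pv_count_sorted R 1
  rw [hlht] at hcl
  cases t with
  | nil => simp at hcl; omega
  | cons h2e t2 =>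
    refine ⟨h2e, t2, rfl, ?_⟩
    have hpw := PySem.List.sorted_pairwise_rev R (fun x => x)
    rw [hlht] at hpw
    have hle1 : h2e ≤ 1 := by
      simpa using (List.pairwise_cons.mp hpw).1 h2e List.mem_cons_self
    have hc2 : 1 ≤ (h2e :: t2).count 1 := by
      have : ((1 : Int) :: h2e :: t2).count 1 = (h2e :: t2).count 1 + 1 := by
        simp [List.count_cons]
      omega
    have hmem1 : (1 : Int) ∈ h2e :: t2 := List.count_pos_iff.mp (by omega)
    have hge1 : 1 ≤ h2e := by
      rcases List.mem_cons.mp hmem1 with hh | hh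
      · omega
      · simpa using (List.pairwise_cons.mp (List.pairwise_cons.mp hpw).2).1 1 hh
    omega

-- the runner-up cannot be 1 when there is at most one LOW and nothing higher
lemma pv_second_not_one {R : List Int} {h2e : Int} {t2 : List Int}
    (hlht : PySem.List.sorted R (fun x => x) true = 1 :: h2e :: t2)
    (h1 : R.count 1 ≤ 1) : h2e ≠ 1 := by
  intro hh
  subst hh
  have hcl : (PySem.List.sorted R (fun x => x) true).count 1 = R.count 1 := pv_count_sorted R 1
  rw [hlht] at hcl
  simp at hcl
  omega

-- ===== VERDICT (by name: the statement is the Claim_ definition above) =====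
lemma pv_pyGet?_one_cons {α : Type} (a b : α) (t : List α) :
    PySem.List.pyGet? (a :: b :: t) 1 = some b := by
  have h := PySem.List.pyGet?_ofNat (a :: b :: t) 1 (by simp)
  simpa using h

theorem generate_community_summary_py_spec : Claim_equal_generate_community_summary_py := by
  intro ivs tfr road _ _
  unfold Spec_generate_community_summary_py
  by_cases hnil : ivs = []
  · simp [generate_community_summary_py, generate_community_summary_py_alt, hnil]
  · unfold generate_community_summary_py generate_community_summary_py_alt
    simp only [if_neg hnil, PySem.List.count_eq]
    set sevs := ivs.map (fun d => (List.lookup "impact_severity" d).getD "") with hsevs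
    set R := ivs.map (fun d => pvRankOf ((List.lookup "impact_severity" d).getD "")) with hRdef
    have hR : R = sevs.map pvRankOf := by
      rw [hsevs, hRdef, List.map_map]; rfl
    have hmem : ∀ r ∈ R, r = 0 ∨ r = 1 ∨ r = 2 ∨ r = 3 := by
      intro r hr
      rw [hRdef] at hr
      simp only [List.mem_map] at hr
      obtain ⟨d, _, rfl⟩ := hr
      exact pvRankOf_mem _
    have hc3 : R.count 3 = sevs.count "HIGH" := by
      rw [hR]; exact count_map_unique pvRankOf 3 "HIGH" pvRankOf_eq_three sevs
    have hc2 : R.count 2 = sevs.count "MEDIUM" := by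
      rw [hR]; exact count_map_unique pvRankOf 2 "MEDIUM" pvRankOf_eq_two sevs
    have hc1 : R.count 1 = sevs.count "LOW" := by
      rw [hR]; exact count_map_unique pvRankOf 1 "LOW" pvRankOf_eq_one sevs
    have hlne : PySem.List.sorted R (fun x => x) true ≠ [] := by
      intro hc
      rw [PySem.List.sorted_eq_nil_iff] at hc
      rw [hRdef] at hc
      exact hnil (List.map_eq_nil_iff.mp hc)
    obtain ⟨h, t, hlht⟩ := List.exists_cons_of_ne_nil hlne
    rw [hlht]
    simp only [PySem.List.pyGet?_zero_cons, Option.getD_some]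
    by_cases hH : List.count "HIGH" sevs > 0
    · have htop : h = 3 := pv_top_three hlht hmem (by rw [hc3]; omega)
      subst htop
      simp only [if_pos hH]
      by_cases hr1 : road = "interstate section" <;> by_cases hr2 : road = "highway lane" <;>
        simp_all [pvSummaries, PySem.List.pyGet?, PySem.List.pyIdx?]
    · simp only [if_neg hH]
      have hH0 : R.count 3 = 0 := by rw [hc3]; omega
      by_cases hM : List.count "MEDIUM" sevs > 0
      · have htop : h = 2 := pv_top_two hlht hmem hH0 (by rw [hc2]; omega)
        subst htop
        simp only [if_pos hM]
        by_cases hr1 : road = "interstate section" <;> by_cases hr2 : road = "highway lane" <;>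
          simp_all [pvSummaries, PySem.List.pyGet?, PySem.List.pyIdx?]
      · simp only [if_neg hM]
        have hM0 : R.count 2 = 0 := by rw [hc2]; omega
        by_cases hL : List.count "LOW" sevs ≥ 2
        · have hL2 : 2 ≤ R.count 1 := by rw [hc1]; omega
          obtain ⟨h2e, t2, rfl, rfl⟩ := pv_second_one hlht hmem hH0 hM0 hL2
          have htop : h = 1 := pv_top_one hlht hmem hH0 hM0 (by omega)
          subst htop
          simp only [if_pos hL, pv_pyGet?_one_cons, Option.getD_some]
          by_cases hr1 : road = "interstate section" <;> by_cases hr2 : road = "highway lane" <;>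
            simp_all [pvSummaries, PySem.List.pyGet?, PySem.List.pyIdx?]
        · simp only [if_neg hL]
          have hL1 : R.count 1 ≤ 1 := by rw [hc1]; omega
          have htop01 : h = 0 ∨ h = 1 := by
            have := pv_top_mem hlht
            rcases hmem h this with rfl | rfl | rfl | rfl
            · left; rfl
            · right; rfl
            · exact absurd (List.count_pos_iff.mpr this) (by omega)
            · exact absurd (List.count_pos_iff.mpr this) (by omega)
          have hsecond : (if h = 1 ∧ (h :: t).length > 1 ∧ (PySem.List.pyGet? (h :: t) 1).getD 0 = 1 then (1:Int) else 0) = 0 := by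
            rcases htop01 with rfl | rfl
            · simp
            · cases t with
              | nil => simp
              | cons h2e t2 =>
                have hne := pv_second_not_one hlht hL1
                simp [hne]
          have hnot2 : ¬ (h ≥ (2:Int)) := by rcases htop01 with rfl | rfl <;> omega
          rw [if_neg hnot2, hsecond]
          clear hsecond htop01 hnot2 hlht hL1 hmem hc1 hc2 hc3 hR hL hM hH hM0 hH0 hRdef hsevs
          by_cases hr1 : road = "interstate section" <;> by_cases hr2 : road = "highway lane" <;>
            simp_all [pvSummaries, PySem.List.pyGet?, PySem.List.pyIdx?]
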